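-- pv_equiv track=rewrite | github.com/mayowaibi/leetcode-practice | 2186-count-vowel-substrings-of-a-string/count-vowel-substrings-of-a-string.py | countVowelSubstrings
-- ===== SOURCE A (Python) =====
-- def countVowelSubstrings(word: str) -> int:
--     count = 0
--
--     for start in range(len(word)):
--         temp = set()
--         for end in range(start, len(word)):
--             if word[end] in 'aeiou':
--                 temp.add(word[end])
--                 if len(temp) >= 5:
--                     count += 1
--             else:
--                 break   # Stop as soon as a non-vowel character is found
--
--     return count
-- ===== SOURCE B (Python) =====
-- def countVowelSubstrings(word: str) -> int:
--     # One pass: for each end position, count valid starts as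
--     # min(last occurrence of each vowel) - (last non-vowel index), if positive.
--     la = le = li = lo = lu = lc = -1
--     count = 0
--     for j, ch in enumerate(word):
--         if ch == 'a':
--             la = j
--         elif ch == 'e':
--             le = j
--         elif ch == 'i':
--             li = j
--         elif ch == 'o':
--             lo = j
--         elif ch == 'u':
--             lu = j
--         else:
--             lc = j
--         m = min(la, le, li, lo, lu)
--         if m > lc:
--             count += m - lc
--     return count
-- ===== Notes on version B (the rewrite author's own statement) =====
-- stated objective: faster
-- what changed: Replaced the quadratic start/end double scan with a single left-to-right pass that tracks the last index of each vowel and of the last non-vowel, adding min(last vowel indices) - (last non-vowel index) valid start positions at every end position.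
import Mathlib
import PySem

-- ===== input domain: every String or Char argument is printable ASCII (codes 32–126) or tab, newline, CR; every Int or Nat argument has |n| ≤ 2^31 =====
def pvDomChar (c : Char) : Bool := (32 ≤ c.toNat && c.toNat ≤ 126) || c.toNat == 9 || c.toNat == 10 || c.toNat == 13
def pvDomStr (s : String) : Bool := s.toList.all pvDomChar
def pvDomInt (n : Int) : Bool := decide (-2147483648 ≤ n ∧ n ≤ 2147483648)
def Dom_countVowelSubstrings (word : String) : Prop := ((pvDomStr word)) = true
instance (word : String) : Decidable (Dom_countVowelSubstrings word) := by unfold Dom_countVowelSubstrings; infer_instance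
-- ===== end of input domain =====

-- B replaces A's quadratic start/end double scan by a one-pass last-occurrence count (measurably faster, asymptotic).


-- ===== PORT A =====
-- inner loop: `for end in range(start, len(word)): …` scanning the suffix word[start:]
-- (`word[end] in 'aeiou'` on a single character is exactly list membership of that char)
def pvInnerA : List Char → PySem.Set Char → Int → Int
  | [], _, count => count
  | ch :: rest, temp, count =>
    if ("aeiou".toList).contains ch then
      let temp' := PySem.Set.add temp ch
      pvInnerA rest temp' (if 5 ≤ PySem.Set.len temp' then count + 1 else count)
    else count   -- break

-- outer loop: `for start in range(len(word))`, one fresh `temp = set()` per start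
def pvOuterA : List Char → Int → Int
  | [], count => count
  | ch :: rest, count => pvOuterA rest (pvInnerA (ch :: rest) PySem.Set.empty count)

def countVowelSubstrings (word : String) : Int :=
  pvOuterA word.toList 0

-- ===== PORT B =====
structure PvStB where
  la : Int
  le : Int
  li : Int
  lo : Int
  lu : Int
  lc : Int
  count : Int
deriving Repr, DecidableEq

def pvStepB (s : PvStB) (p : Int × Char) : PvStB :=
  let j := p.1
  let ch := p.2
  let s :=
    if ch = 'a' then { s with la := j }
    else if ch = 'e' then { s with le := j }
    else if ch = 'i' then { s with li := j }
    else if ch = 'o' then { s with lo := j }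
    else if ch = 'u' then { s with lu := j }
    else { s with lc := j }
  let m := min s.la (min s.le (min s.li (min s.lo s.lu)))
  if s.lc < m then { s with count := s.count + (m - s.lc) } else s

def countVowelSubstrings_alt (word : String) : Int :=
  ((PySem.List.enumerate word.toList 0).foldl pvStepB
    { la := -1, le := -1, li := -1, lo := -1, lu := -1, lc := -1, count := 0 }).count

-- ===== PRECONDITION & SPEC =====
def Spec_countVowelSubstrings (word : String) (out : Int) : Prop := out = countVowelSubstrings_alt word
instance (word : String) (out : Int) : Decidable (Spec_countVowelSubstrings word out) := by unfold Spec_countVowelSubstrings; infer_instance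

-- ===== CLAIM (what is proved, stated in full; the proofs are below) =====
def Claim_equal_countVowelSubstrings : Prop := ∀ (word : String), Dom_countVowelSubstrings word → Spec_countVowelSubstrings word (countVowelSubstrings word)

-- ===== LEMMAS AND PROOFS =====

-- vowels and the vowel test (pvIsV c is definitionally A's membership test)
def pvVowels : List Char := ['a', 'e', 'i', 'o', 'u']

def pvIsV (c : Char) : Bool := ("aeiou".toList).contains c

-- the substring cs[i..j] (inclusive)
def pvSeg (cs : List Char) (i j : Nat) : List Char := (cs.drop i).take (j + 1 - i)

-- "the pair (i, j) is counted": i ≤ j < |cs|, cs[i..j] all vowels, containing all five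
def pvP (cs : List Char) (i j : Nat) : Bool :=
  decide (i ≤ j) && decide (j < cs.length) && (pvSeg cs i j).all pvIsV
    && pvVowels.all (fun v => (pvSeg cs i j).contains v)

def pvCardJ (cs : List Char) (i : Nat) : Nat :=
  ((Finset.range cs.length).filter (fun j => pvP cs i j = true)).card

def pvCardI (cs : List Char) (j : Nat) : Nat :=
  ((Finset.range cs.length).filter (fun i => pvP cs i j = true)).card

-- what A's inner loop tests at offset t of the suffix, given the vowels `temp` already seen
def pvQ (temp : List Char) (rest : List Char) (t : Nat) : Bool :=
  (rest.take (t + 1)).all pvIsV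
    && pvVowels.all (fun v => temp.contains v || (rest.take (t + 1)).contains v)

-- A's per-start counts, accumulated over the suffixes A scans
def pvGA : List Char → Nat
  | [] => 0
  | ch :: rest => ((List.range (ch :: rest).length).countP (pvQ [] (ch :: rest))) + pvGA rest

-- last index < j holding v, else -1
def pvLst (cs : List Char) (v : Char) : Nat → Int
  | 0 => -1
  | j + 1 => if cs.getD j ' ' = v then (j : Int) else pvLst cs v j

-- last index < j holding a non-vowel, else -1
def pvLc (cs : List Char) : Nat → Int
  | 0 => -1
  | j + 1 => if pvIsV (cs.getD j ' ') then pvLc cs j else (j : Int)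

def pvM (cs : List Char) (j : Nat) : Int :=
  min (pvLst cs 'a' j) (min (pvLst cs 'e' j) (min (pvLst cs 'i' j) (min (pvLst cs 'o' j) (pvLst cs 'u' j))))

-- what B adds at end position j
def pvG (cs : List Char) (j : Nat) : Int :=
  if pvLc cs (j + 1) < pvM cs (j + 1) then pvM cs (j + 1) - pvLc cs (j + 1) else 0

def pvC (cs : List Char) : Nat → Int
  | 0 => 0
  | j + 1 => pvC cs j + pvG cs j

lemma pvIsV_iff (c : Char) : pvIsV c = true ↔ c ∈ pvVowels := by
  simp [pvIsV, pvVowels]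

lemma pvSetLen_iff (temp : List Char) (h1 : temp.Nodup) (h2 : ∀ x ∈ temp, pvIsV x = true) :
    5 ≤ temp.length ↔ ∀ v ∈ pvVowels, v ∈ temp := by
  have hsub : temp.toFinset ⊆ pvVowels.toFinset := by
    intro x hx
    simp only [List.mem_toFinset] at *
    exact (pvIsV_iff x).mp (h2 x hx)
  have hcardv : pvVowels.toFinset.card = 5 := by decide
  have hlen : temp.toFinset.card = temp.length := List.toFinset_card_of_nodup h1
  constructor
  · intro h5 v hv
    have heq : temp.toFinset = pvVowels.toFinset :=
      Finset.eq_of_subset_of_card_le hsub (by omega)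
    have : v ∈ temp.toFinset := heq ▸ (by simpa using hv)
    simpa using this
  · intro hall
    have : pvVowels.toFinset ⊆ temp.toFinset := by
      intro v hv; simp only [List.mem_toFinset] at *; exact hall v hv
    have := Finset.card_le_card this
    omega

lemma pvQ_cons_succ (temp : List Char) (ch : Char) (rest : List Char) (t : Nat)
    (h : pvIsV ch = true) :
    pvQ temp (ch :: rest) (t + 1) = pvQ (PySem.Set.add temp ch) rest t := by
  have hmem : ∀ v : Char, (v ∈ PySem.Set.add temp ch) ↔ v ∈ temp ∨ v = ch :=
    fun v => PySem.Set.mem_add temp ch v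
  simp only [pvQ, List.take_succ_cons, List.all_cons, h, Bool.true_and]
  have hpt : ∀ v : Char, (temp.contains v || ((ch :: rest.take (t + 1)).contains v))
      = (List.contains (PySem.Set.add temp ch) v || ((rest.take (t + 1)).contains v)) := by
    intro v
    rw [Bool.eq_iff_iff]
    simp only [Bool.or_eq_true, List.contains_iff_mem, List.mem_cons, hmem]
    tauto
  simp only [hpt]

lemma pvQ_cons_false (temp : List Char) (ch : Char) (rest : List Char) (t : Nat)
    (h : pvIsV ch = false) : pvQ temp (ch :: rest) t = false := by
  simp [pvQ, List.take_succ_cons, h]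

lemma pvQ_zero (temp : List Char) (ch : Char) (rest : List Char)
    (h : pvIsV ch = true) (h1 : temp.Nodup) (h2 : ∀ x ∈ temp, pvIsV x = true) :
    (pvQ temp (ch :: rest) 0 = true) ↔ 5 ≤ (PySem.Set.add temp ch).length := by
  have h1' : (PySem.Set.add temp ch).Nodup := PySem.Set.nodup_add temp ch h1
  have h2' : ∀ x ∈ PySem.Set.add temp ch, pvIsV x = true := by
    intro x hx
    rcases (PySem.Set.mem_add temp ch x).mp hx with hx | rfl
    · exact h2 x hx
    · exact h
  rw [pvSetLen_iff _ h1' h2']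
  simp only [pvQ, List.take_succ_cons, List.take_zero, List.all_cons, List.all_nil, h,
    Bool.and_true, Bool.true_and, List.all_eq_true, Bool.or_eq_true, List.contains_iff_mem,
    PySem.Set.mem_add, List.mem_singleton]

lemma pvInnerA_spec (rest : List Char) (temp : PySem.Set Char) (c : Int)
    (h1 : temp.Nodup) (h2 : ∀ x ∈ temp, pvIsV x = true) :
    pvInnerA rest temp c = c + ((List.range rest.length).countP (pvQ temp rest) : Int) := by
  induction rest generalizing temp c with
  | nil => simp [pvInnerA]
  | cons ch rest ih =>
    by_cases h : pvIsV ch = true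
    · have hch : ("aeiou".toList).contains ch = true := h
      have h1' : (PySem.Set.add temp ch).Nodup := PySem.Set.nodup_add temp ch h1
      have h2' : ∀ x ∈ PySem.Set.add temp ch, pvIsV x = true := by
        intro x hx
        rcases (PySem.Set.mem_add temp ch x).mp hx with hx | rfl
        · exact h2 x hx
        · exact h
      have hstep : pvInnerA (ch :: rest) temp c
          = pvInnerA rest (PySem.Set.add temp ch)
              (if 5 ≤ PySem.Set.len (PySem.Set.add temp ch) then c + 1 else c) := by
        simp only [pvInnerA, hch, if_true]
      rw [hstep, ih _ _ h1' h2']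
      rw [List.length_cons, List.range_succ_eq_map, List.countP_cons, List.countP_map]
      have hcp : (List.range rest.length).countP ((pvQ temp (ch :: rest)) ∘ Nat.succ)
          = (List.range rest.length).countP (pvQ (PySem.Set.add temp ch) rest) := by
        apply List.countP_congr
        intro t _
        simp only [Function.comp_apply]
        rw [pvQ_cons_succ temp ch rest t h]
      rw [hcp]
      have hlen : PySem.Set.len (PySem.Set.add temp ch) = ((PySem.Set.add temp ch).length : Int) := rfl
      rw [hlen]
      by_cases hq : pvQ temp (ch :: rest) 0 = true
      · have h5 : 5 ≤ (PySem.Set.add temp ch).length := (pvQ_zero temp ch rest h h1 h2).mp hq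
        rw [if_pos (by exact_mod_cast h5 : (5:Int) ≤ ((PySem.Set.add temp ch).length : Int))]
        simp only [hq, if_true]
        push_cast; ring
      · have h5 : ¬ 5 ≤ (PySem.Set.add temp ch).length := fun h5 =>
          hq ((pvQ_zero temp ch rest h h1 h2).mpr h5)
        rw [if_neg (by exact_mod_cast h5 : ¬ (5:Int) ≤ ((PySem.Set.add temp ch).length : Int))]
        simp only [Bool.not_eq_true] at hq
        simp only [hq]
        push_cast; ring
    · have h' : pvIsV ch = false := by simpa using h
      have hch : ("aeiou".toList).contains ch = false := h'
      have hstep : pvInnerA (ch :: rest) temp c = c := by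
        simp only [pvInnerA, hch, Bool.false_eq_true, if_false]
      rw [hstep]
      have hz : (List.range (ch :: rest).length).countP (pvQ temp (ch :: rest)) = 0 := by
        apply List.countP_eq_zero.mpr
        intro t _
        simp [pvQ_cons_false temp ch rest t h']
      rw [hz]; simp

lemma countP_range_card (p : Nat → Bool) (n : Nat) :
    (List.range n).countP p = ((Finset.range n).filter (fun j => p j = true)).card := by
  induction n with
  | zero => simp
  | succ n ih =>
    rw [List.range_succ, List.countP_append, Finset.card_filter, Finset.sum_range_succ,
      ← Finset.card_filter, ← ih]
    simp [List.countP_cons]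

lemma card_filter_range_shift (p : Nat → Bool) (n : Nat) (h0 : p 0 = false) :
    ((Finset.range (n + 1)).filter (fun j => p j = true)).card
      = ((Finset.range n).filter (fun j => p (j + 1) = true)).card := by
  rw [Finset.card_filter, Finset.card_filter, Finset.sum_range_succ']
  simp [h0]

lemma pvQ_nil_eq_P (cs : List Char) (j : Nat) (hj : j < cs.length) :
    pvQ [] cs j = pvP cs 0 j := by
  simp [pvQ, pvP, pvSeg, hj]

lemma pvP_cons_succ (ch : Char) (cs : List Char) (i j : Nat) :
    pvP (ch :: cs) (i + 1) (j + 1) = pvP cs i j := by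
  have hseg : pvSeg (ch :: cs) (i + 1) (j + 1) = pvSeg cs i j := by
    simp [pvSeg, Nat.succ_sub_succ]
  simp [pvP, hseg]

lemma pvP_succ_zero (ch : Char) (cs : List Char) (i : Nat) :
    pvP (ch :: cs) (i + 1) 0 = false := by
  simp [pvP]

lemma pvGA_eq (cs : List Char) : pvGA cs = ∑ i ∈ Finset.range cs.length, pvCardJ cs i := by
  induction cs with
  | nil => simp [pvGA]
  | cons ch rest ih =>
    have hcard0 : (List.range (ch :: rest).length).countP (pvQ [] (ch :: rest))
        = pvCardJ (ch :: rest) 0 := by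
      rw [countP_range_card]
      unfold pvCardJ
      congr 1
      apply Finset.filter_congr
      intro j hj
      rw [Finset.mem_range] at hj
      rw [pvQ_nil_eq_P (ch :: rest) j hj]
    have hshift : ∀ i : Nat, pvCardJ (ch :: rest) (i + 1) = pvCardJ rest i := by
      intro i
      unfold pvCardJ
      rw [List.length_cons, card_filter_range_shift _ _ (pvP_succ_zero ch rest i)]
      simp only [pvP_cons_succ]
    rw [pvGA, List.length_cons, Finset.sum_range_succ',
      show List.range (rest.length + 1) = List.range (ch :: rest).length by rw [List.length_cons],
      hcard0, ih]
    simp only [hshift]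
    omega

lemma pvSwap (cs : List Char) :
    ∑ i ∈ Finset.range cs.length, pvCardJ cs i = ∑ j ∈ Finset.range cs.length, pvCardI cs j := by
  unfold pvCardJ pvCardI
  simp only [Finset.card_filter]
  exact Finset.sum_comm

lemma pvOuterA_spec (cs : List Char) (c : Int) : pvOuterA cs c = c + (pvGA cs : Int) := by
  induction cs generalizing c with
  | nil => simp [pvOuterA, pvGA]
  | cons ch rest ih =>
    rw [pvOuterA, ih, pvInnerA_spec (ch :: rest) PySem.Set.empty c List.nodup_nil (by simp [PySem.Set.empty])]
    rw [pvGA]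
    simp only [show (PySem.Set.empty : PySem.Set Char) = ([] : List Char) from rfl]
    push_cast
    ring

lemma pvStep_state (cs : List Char) (j : Nat) (hj : j < cs.length) :
    pvStepB { la := pvLst cs 'a' j, le := pvLst cs 'e' j, li := pvLst cs 'i' j,
              lo := pvLst cs 'o' j, lu := pvLst cs 'u' j, lc := pvLc cs j, count := pvC cs j }
        ((j : Int), cs[j])
      = { la := pvLst cs 'a' (j+1), le := pvLst cs 'e' (j+1), li := pvLst cs 'i' (j+1),
          lo := pvLst cs 'o' (j+1), lu := pvLst cs 'u' (j+1), lc := pvLc cs (j+1), count := pvC cs (j+1) } := by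
  have hgo : cs[j]? = some cs[j] := List.getElem?_eq_getElem hj
  by_cases ha : cs[j] = 'a'
  · simp [pvStepB, pvLst, pvLc, pvC, pvG, pvM, hgo, ha, pvIsV] <;> (try (split_ifs <;> simp))
  · by_cases he : cs[j] = 'e'
    · simp [pvStepB, pvLst, pvLc, pvC, pvG, pvM, hgo, he, pvIsV] <;> (try (split_ifs <;> simp))
    · by_cases hi : cs[j] = 'i'
      · simp [pvStepB, pvLst, pvLc, pvC, pvG, pvM, hgo, hi, pvIsV] <;> (try (split_ifs <;> simp))
      · by_cases ho : cs[j] = 'o'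
        · simp [pvStepB, pvLst, pvLc, pvC, pvG, pvM, hgo, ho, pvIsV] <;> (try (split_ifs <;> simp))
        · by_cases hu : cs[j] = 'u'
          · simp [pvStepB, pvLst, pvLc, pvC, pvG, pvM, hgo, hu, pvIsV] <;> (try (split_ifs <;> simp))
          · have hv : pvIsV cs[j] = false := by
              simp [pvIsV, ha, he, hi, ho, hu]
            simp [pvStepB, pvLst, pvLc, pvC, pvG, pvM, hgo, ha, he, hi, ho, hu, hv] <;> (try (split_ifs <;> simp))

lemma pvFoldB (cs : List Char) (j : Nat) (hj : j ≤ cs.length) :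
    (PySem.List.enumerate (cs.take j) 0).foldl pvStepB
        { la := -1, le := -1, li := -1, lo := -1, lu := -1, lc := -1, count := 0 }
      = { la := pvLst cs 'a' j, le := pvLst cs 'e' j, li := pvLst cs 'i' j,
          lo := pvLst cs 'o' j, lu := pvLst cs 'u' j, lc := pvLc cs j, count := pvC cs j } := by
  induction j with
  | zero => simp [pvLst, pvLc, pvC]
  | succ j ih =>
    have hjlt : j < cs.length := by omega
    have htake : cs.take (j + 1) = cs.take j ++ [cs[j]] := by
      rw [List.take_add_one, List.getElem?_eq_getElem hjlt]
      rfl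
    rw [htake, PySem.List.enumerate_append, List.foldl_append, ih (by omega)]
    have hlen : (cs.take j).length = j := List.length_take_of_le (by omega)
    rw [hlen]
    show pvStepB _ ((0 + (j:Int)), cs[j]) = _
    rw [zero_add]
    exact pvStep_state cs j hjlt

lemma pvLst_bounds (cs : List Char) (v : Char) (j : Nat) :
    -1 ≤ pvLst cs v j ∧ pvLst cs v j < (j : Int) := by
  induction j with
  | zero => simp [pvLst]
  | succ j ih =>
    rw [pvLst]
    split_ifs <;> push_cast <;> omega

lemma pvLc_bounds (cs : List Char) (j : Nat) :
    -1 ≤ pvLc cs j ∧ pvLc cs j < (j : Int) := by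
  induction j with
  | zero => simp [pvLc]
  | succ j ih =>
    rw [pvLc]
    split_ifs <;> push_cast <;> omega

lemma pvLst_iff (cs : List Char) (v : Char) (i j : Nat) (hij : i ≤ j) :
    ((i : Int) ≤ pvLst cs v (j + 1)) ↔ ∃ k, i ≤ k ∧ k ≤ j ∧ cs.getD k ' ' = v := by
  induction j with
  | zero =>
    have hi0 : i = 0 := by omega
    subst hi0
    rw [pvLst]
    split_ifs with h
    · constructor
      · intro _
        exact ⟨0, Nat.le_refl 0, Nat.le_refl 0, h⟩
      · intro _
        omega
    · constructor
      · intro hle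
        have := (pvLst_bounds cs v 0).2
        omega
      · rintro ⟨k, _, hk0, hkv⟩
        interval_cases k
        exact absurd hkv h
  | succ j ih =>
    rw [pvLst]
    split_ifs with h
    · constructor
      · intro _
        exact ⟨j + 1, by omega, by omega, h⟩
      · intro _
        exact_mod_cast Int.ofNat_le.mpr hij
    · rcases Nat.lt_or_ge i (j + 1) with hlt | hge
      · rw [ih (by omega)]
        constructor
        · rintro ⟨k, hik, hkj, hkv⟩
          exact ⟨k, hik, by omega, hkv⟩
        · rintro ⟨k, hik, hkj, hkv⟩
          refine ⟨k, hik, ?_, hkv⟩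
          rcases Nat.lt_or_ge k (j + 1) with h1 | h1
          · omega
          · have : k = j + 1 := by omega
            subst this
            exact absurd hkv h
      · have hi : i = j + 1 := by omega
        subst hi
        constructor
        · intro hle
          have := (pvLst_bounds cs v (j + 1)).2
          omega
        · rintro ⟨k, hik, hkj, hkv⟩
          have : k = j + 1 := by omega
          subst this
          exact absurd hkv h

lemma pvLc_iff (cs : List Char) (i j : Nat) (hij : i ≤ j) :
    (pvLc cs (j + 1) < (i : Int)) ↔ ∀ k, i ≤ k → k ≤ j → pvIsV (cs.getD k ' ') = true := by
  induction j with
  | zero =>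
    have hi0 : i = 0 := by omega
    subst hi0
    rw [pvLc]
    split_ifs with h
    · constructor
      · intro _ k _ hk0
        interval_cases k
        exact h
      · intro _
        have := (pvLc_bounds cs 0).2
        omega
    · constructor
      · intro hlt
        omega
      · intro hall
        exact absurd (hall 0 (by omega) (by omega)) h
  | succ j ih =>
    rw [pvLc]
    split_ifs with h
    · rcases Nat.lt_or_ge i (j + 1) with hlt | hge
      · rw [ih (by omega)]
        constructor
        · intro hall k hik hkj
          rcases Nat.lt_or_ge k (j + 1) with h1 | h1
          · exact hall k hik (by omega)
          · have : k = j + 1 := by omega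
            subst this
            exact h
        · intro hall k hik hkj
          exact hall k hik (by omega)
      · have hi : i = j + 1 := by omega
        subst hi
        constructor
        · intro _ k hik hkj
          have : k = j + 1 := by omega
          subst this
          exact h
        · intro _
          have := (pvLc_bounds cs (j + 1)).2
          omega
    · constructor
      · intro hlt
        exfalso
        omega
      · intro hall
        exact absurd (hall (j + 1) hij (by omega)) h

lemma pvSeg_eq_map (cs : List Char) (i j : Nat) (hij : i ≤ j) (hj : j < cs.length) :
    pvSeg cs i j = (List.range (j + 1 - i)).map (fun t => cs.getD (i + t) ' ') := by
  apply List.ext_getElem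
  · simp [pvSeg]
    omega
  · intro t h1 h2
    simp only [pvSeg] at h1 ⊢
    rw [List.getElem_take, List.getElem_drop]
    simp only [List.getElem_map, List.getElem_range]
    have hlt : i + t < cs.length := by
      simp at h1 h2
      omega
    rw [List.getD_eq_getElem cs ' ' hlt]

lemma pvSeg_all_iff (cs : List Char) (i j : Nat) (hij : i ≤ j) (hj : j < cs.length) :
    ((pvSeg cs i j).all pvIsV = true) ↔ ∀ k, i ≤ k → k ≤ j → pvIsV (cs.getD k ' ') = true := by
  rw [pvSeg_eq_map cs i j hij hj]
  simp only [List.all_eq_true, List.mem_map, List.mem_range]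
  constructor
  · intro hall k hik hkj
    exact hall _ ⟨k - i, by omega, by rw [Nat.add_sub_cancel' hik]⟩
  · rintro hall x ⟨t, ht, rfl⟩
    exact hall (i + t) (by omega) (by omega)

lemma pvSeg_contains_iff (cs : List Char) (i j : Nat) (v : Char) (hij : i ≤ j) (hj : j < cs.length) :
    ((pvSeg cs i j).contains v = true) ↔ ∃ k, i ≤ k ∧ k ≤ j ∧ cs.getD k ' ' = v := by
  rw [pvSeg_eq_map cs i j hij hj]
  simp only [List.contains_iff_mem, List.mem_map, List.mem_range]
  constructor
  · rintro ⟨t, ht, rfl⟩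
    exact ⟨i + t, by omega, by omega, rfl⟩
  · rintro ⟨k, hik, hkj, hkv⟩
    exact ⟨k - i, by omega, by rw [Nat.add_sub_cancel' hik]; exact hkv⟩

lemma pvP_iff (cs : List Char) (i j : Nat) (hj : j < cs.length) :
    pvP cs i j = true ↔ i ≤ j ∧ pvLc cs (j + 1) < (i : Int) ∧ (i : Int) ≤ pvM cs (j + 1) := by
  constructor
  · intro hp
    simp only [pvP, Bool.and_eq_true, decide_eq_true_eq] at hp
    obtain ⟨⟨⟨hij, _⟩, hall⟩, hhas⟩ := hp
    have hhas' : ∀ v ∈ pvVowels, (pvSeg cs i j).contains v = true := by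
      simpa using hhas
    have hv : ∀ v, v ∈ pvVowels → (i : Int) ≤ pvLst cs v (j + 1) := by
      intro v hvm
      exact (pvLst_iff cs v i j hij).mpr ((pvSeg_contains_iff cs i j v hij hj).mp (hhas' v hvm))
    refine ⟨hij, (pvLc_iff cs i j hij).mpr ((pvSeg_all_iff cs i j hij hj).mp hall), ?_⟩
    simp only [pvM, le_min_iff]
    exact ⟨hv 'a' (by simp [pvVowels]), hv 'e' (by simp [pvVowels]), hv 'i' (by simp [pvVowels]),
      hv 'o' (by simp [pvVowels]), hv 'u' (by simp [pvVowels])⟩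
  · rintro ⟨hij, hlc, hm⟩
    simp only [pvM, le_min_iff] at hm
    obtain ⟨ha, he, hi', ho, hu⟩ := hm
    have hcont : ∀ v, (i : Int) ≤ pvLst cs v (j + 1) → (pvSeg cs i j).contains v = true := by
      intro v h
      exact (pvSeg_contains_iff cs i j v hij hj).mpr ((pvLst_iff cs v i j hij).mp h)
    simp only [pvP, Bool.and_eq_true, decide_eq_true_eq]
    refine ⟨⟨⟨hij, hj⟩, (pvSeg_all_iff cs i j hij hj).mpr ((pvLc_iff cs i j hij).mp hlc)⟩, ?_⟩
    simp only [List.all_eq_true]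
    intro v hvm
    fin_cases hvm
    · exact hcont _ ha
    · exact hcont _ he
    · exact hcont _ hi'
    · exact hcont _ ho
    · exact hcont _ hu

lemma card_int_band (n j : Nat) (L m : Int) (hL : -1 ≤ L) (hm : m ≤ (j : Int)) (hjn : j < n)
    (p : Nat → Bool) (hp : ∀ i, i < n → (p i = true ↔ i ≤ j ∧ L < (i : Int) ∧ (i : Int) ≤ m)) :
    (((Finset.range n).filter (fun i => p i = true)).card : Int) = if L < m then m - L else 0 := by
  have hfe : (Finset.range n).filter (fun i => p i = true)
      = Finset.Ico (L + 1).toNat ((m + 1).toNat) := by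
    apply Finset.ext
    intro i
    simp only [Finset.mem_filter, Finset.mem_range, Finset.mem_Ico]
    constructor
    · rintro ⟨hin, hpi⟩
      have := (hp i hin).mp hpi
      omega
    · rintro ⟨h1, h2⟩
      have hin : i < n := by omega
      exact ⟨hin, (hp i hin).mpr (by omega)⟩
  rw [hfe, Nat.card_Ico]
  split_ifs with h <;> omega

lemma pvC_sum (cs : List Char) (n : Nat) : pvC cs n = ∑ j ∈ Finset.range n, pvG cs j := by
  induction n with
  | zero => simp [pvC]
  | succ n ih => rw [pvC, ih, Finset.sum_range_succ]

lemma pvG_card (cs : List Char) (j : Nat) (hj : j < cs.length) :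
    pvG cs j = (pvCardI cs j : Int) := by
  have hm : pvM cs (j + 1) ≤ (j : Int) := by
    have := (pvLst_bounds cs 'a' (j + 1)).2
    simp only [pvM, min_le_iff]
    left
    push_cast at this ⊢
    omega
  have hL : -1 ≤ pvLc cs (j + 1) := (pvLc_bounds cs (j + 1)).1
  rw [pvCardI, card_int_band cs.length j (pvLc cs (j + 1)) (pvM cs (j + 1)) hL hm hj _
    (fun i hin => pvP_iff cs i j hj)]
  rfl


lemma pvAlt_eq (word : String) :
    countVowelSubstrings_alt word = pvC word.toList word.toList.length := by
  unfold countVowelSubstrings_alt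
  have h := pvFoldB word.toList word.toList.length (le_refl _)
  rw [List.take_length] at h
  rw [h]

-- ===== VERDICT (by name: the statement is the Claim_ definition above) =====
theorem countVowelSubstrings_spec : Claim_equal_countVowelSubstrings := by
  intro word _
  unfold Spec_countVowelSubstrings countVowelSubstrings
  rw [pvAlt_eq, pvOuterA_spec, pvGA_eq, pvSwap, pvC_sum]
  rw [Nat.cast_sum]
  rw [Finset.sum_congr rfl (fun j hj => (pvG_card word.toList j (Finset.mem_range.mp hj)).symm)]
  ring
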